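/-
  THE CONTRACTS OF THE LZW DECODER (design/CONTRACTS.md entries 5-7, 9, 10; design/INVARIANTS.md §3, §4, §6): `DGifGetPrefixChar`,
  `DGifSetupDecompress`, `DGifDecompressInput`, `DGifDecompressLine`, `DGifGetLine`. Vocabulary: Gif/Spec/Common.lean; the readers:
  Gif/Spec/Reader.lean.

  THE DECODE-TIME CLAUSE `LZOK mem pv` (the LZW field ranges) is established by a successful DGifSetupDecompress, asked and given
  back by DGifDecompressInput, DGifDecompressLine, DGifGetLine. NOTHING is said about the contents of `Buf`, `Stack`, `Suffix`,
  `Prefix`, of `LastCode`, `MaxCode1`, `CrntShiftDWord`: every table access is guarded, in the same basic block or the loop test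
  before it, by a range test on the index itself, or the index is a masked 12-bit value, or it is `RunningCode − 2`.

  THE FOUR TABLES ARE FIELDS OF ONE HEAP OBJECT: the sanitizer cannot tell them apart. The footprints below list them as SEPARATE
  windows, each function names only the tables it stores to, and every access of a proof is justified with `bufLive`, `stackLive`,
  `suffixLive`, `prefixLive` (Common.lean §6), whose hypothesis is the index bound against THE ARRAY'S OWN count
  (design/TABLES.md: the access table and how the end theorem exports it).

  FRAMES (design/FRAMES.gif.txt):
      function               own                        callees (frame)                                       frame
      DGifGetPrefixChar      4 pushes + sub 8 = 40      a check (16)                                 40 + 8 + 16 = 64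
      DGifSetupDecompress    6 pushes + sub 72 = 120    InternalRead (176), checks                 120 + 8 + 176 = 304
      DGifDecompressInput    6 pushes + sub 72 = 120    DGifBufferedInput (224), checks            120 + 8 + 224 = 352
      DGifDecompressLine     6 pushes + sub 152 = 200   DGifDecompressInput (352), DGifGetPrefixChar (64)   200 + 8 + 352 = 560
      DGifGetLine            6 pushes + sub 72 = 120    DGifDecompressLine (560), DGifGetCodeNext (320)     120 + 8 + 560 = 688
-/
import Gif.Spec.CommonMore
import Gif.Spec.Reader
namespace Gif.Spec
open X86 X86.User Asan ProgX.Base ProgX.Base.Spec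

/-- **`DGifGetPrefixChar(rdi = Prefix, esi = Code, edx = ClearCode)`** (dgif_lib.c:1011-1022, static): follows `Prefix[]` from `Code`
while `Code > ClearCode`, at most 4097 times; `Code > LZ_MAX_CODE` is tested BEFORE `Prefix[Code]`. TOTAL in `Code` (any `int`:
4098 = NO_SUCH_CODE arrives here). `Prefix` is `pv.Prefix` (4096 × 4 bytes at `pv + 8536`) of the live private object; `ClearCode`
is not negative (then `Code > ClearCode` gives `Code ≥ 1`, and the index is in `[1, 4095]`). Stores nothing; the result is any
`int` (the callers truncate it to a byte). -/
def DGifGetPrefixChar.spec (H : Heap) (rest : List Obj) (frames : List (Nat × FrameLayout)) (pv : Nat) : Spec where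
  pre u :=
    HeapPre H rest frames u ∧
    H.Live pv 24936 ∧
    (u.reg .rdi).toNat = pv + 8536 ∧
    (u.reg .rdx).toNat % 2 ^ 32 < 2 ^ 31
  post u v :=
    ShadowUntouched u.mem v.mem
  frame := 64
  writes _ := []

@[vspec] theorem DGifGetPrefixChar.spec_frame (H : Heap) (rest : List Obj) (frames : List (Nat × FrameLayout)) (pv : Nat) :
    (DGifGetPrefixChar.spec H rest frames pv).frame = 64 := id rfl

@[vspec] theorem DGifGetPrefixChar.spec_writes (H : Heap) (rest : List Obj) (frames : List (Nat × FrameLayout)) (pv : Nat)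
    (u : State) : (DGifGetPrefixChar.spec H rest frames pv).writes u = [] := id rfl

/-- **`DGifSetupDecompress(rdi = gif)`** (dgif_lib.c:813-852, static; a PROTECTED frame: the byte `CodeSize`): reads the code size;
rejects anything outside 2 … 8 BEFORE its first store to pv; then `Buf[0] = 0`, the eleven LZW scalars, `Prefix[0 … 4095] =
NO_SUCH_CODE`. GIF_OK: **`LZOK`** holds (`RunningCode = ClearCode + 2`, `RunningBits = BitsPerPixel + 1`, `StackPtr = 0`,
`CrntShiftState = 0`), exactly one byte was consumed. Footprint: `[pv + 8, pv + 56)` (BitsPerPixel … CrntShiftDWord), `Buf[0]`,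
`Prefix`, `gif.Error`, `c->cur`. -/
def DGifSetupDecompress.spec (H : Heap) (rest : List Obj) (frames : List (Nat × FrameLayout)) (F : Forest) (R : Rd) : Spec where
  pre u :=
    Env H rest frames F R u ∧
    (u.reg .rdi).toNat = F.gif
  post u v :=
    Back H rest frames F R u v ∧
    IsBool v ∧
    ((v.reg .rax).toNat = 1 → LZOK v.mem F.pv ∧ rem R v.mem + 1 = rem R u.mem)
  frame := 304
  writes _ :=
    [⟨F.pv + 8, F.pv + 56⟩,
     ⟨F.pv + 88, F.pv + 89⟩,
     ⟨F.pv + 8536, F.pv + 24920⟩,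
     ⟨F.gif + 96, F.gif + 100⟩,
     ⟨R.cur, R.cur + 8⟩]

@[vspec] theorem DGifSetupDecompress.spec_frame (H : Heap) (rest : List Obj) (frames : List (Nat × FrameLayout)) (F : Forest)
    (R : Rd) : (DGifSetupDecompress.spec H rest frames F R).frame = 304 := id rfl

@[vspec] theorem DGifSetupDecompress.spec_writes (H : Heap) (rest : List Obj) (frames : List (Nat × FrameLayout)) (F : Forest)
    (R : Rd) (u : State) :
    (DGifSetupDecompress.spec H rest frames F R).writes u =
      [⟨F.pv + 8, F.pv + 56⟩,
       ⟨F.pv + 88, F.pv + 89⟩,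
       ⟨F.pv + 8536, F.pv + 24920⟩,
       ⟨F.gif + 96, F.gif + 100⟩,
       ⟨R.cur, R.cur + 8⟩] := id rfl

/-- **`DGifDecompressInput(rdi = gif, rsi = Code)`** (dgif_lib.c:1068-1110, static; a PROTECTED frame: the byte `NextByte`): fills the
shift register from DGifBufferedInput while `CrntShiftState < RunningBits`, masks the code with `CodeMasks[RunningBits]` (a
registered global of 13 × u16: the index is in bounds by LZ4, the value is at most FFFH by K1), shifts, and advances
`RunningCode` (only below 4097) and `RunningBits` (only below 12). GIF_OK: `*Code ≤ 4095`, `LZOK` again, and THE MEASURE `mu` went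
down by at least 1 (by `RunningBits ≥ 1`). GIF_ERROR (from inside the fill loop): `LZOK` again (LZ6 is stated as `≤ 11` so that
it survives this return). `Code` points to a 4-byte stack object of the caller. Footprint: `[pv + 20, pv + 32)` (RunningCode,
RunningBits, MaxCode1), `[pv + 44, pv + 56)` (CrntShiftState, CrntShiftDWord), `Buf`, `*Code`, `gif.Error`, `c->cur`: NOT
BitsPerPixel, ClearCode, EOFCode, LastCode, StackPtr; NOT `Stack`, `Suffix`, `Prefix`. -/
def DGifDecompressInput.spec (H : Heap) (rest : List Obj) (frames : List (Nat × FrameLayout)) (F : Forest) (R : Rd) : Spec where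
  pre u :=
    Env H rest frames F R u ∧
    LZOK u.mem F.pv ∧
    (u.reg .rdi).toNat = F.gif ∧
    OutPtr H rest frames F R (u.reg .rsi).toNat 4
  post u v :=
    Back H rest frames F R u v ∧
    LZOK v.mem F.pv ∧
    IsBool v ∧
    ((v.reg .rax).toNat = 1 →
      rd v.mem (u.reg .rsi).toNat 4 ≤ 4095 ∧ mu R v.mem F.pv + 1 ≤ mu R u.mem F.pv)
  frame := 352
  writes u :=
    [⟨F.pv + 20, F.pv + 32⟩,
     ⟨F.pv + 44, F.pv + 56⟩,
     ⟨F.pv + 88, F.pv + 344⟩,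
     ⟨(u.reg .rsi).toNat, (u.reg .rsi).toNat + 4⟩,
     ⟨F.gif + 96, F.gif + 100⟩,
     ⟨R.cur, R.cur + 8⟩]

@[vspec] theorem DGifDecompressInput.spec_frame (H : Heap) (rest : List Obj) (frames : List (Nat × FrameLayout)) (F : Forest)
    (R : Rd) : (DGifDecompressInput.spec H rest frames F R).frame = 352 := id rfl

@[vspec] theorem DGifDecompressInput.spec_writes (H : Heap) (rest : List Obj) (frames : List (Nat × FrameLayout)) (F : Forest)
    (R : Rd) (u : State) :
    (DGifDecompressInput.spec H rest frames F R).writes u =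
      [⟨F.pv + 20, F.pv + 32⟩,
       ⟨F.pv + 44, F.pv + 56⟩,
       ⟨F.pv + 88, F.pv + 344⟩,
       ⟨(u.reg .rsi).toNat, (u.reg .rsi).toNat + 4⟩,
       ⟨F.gif + 96, F.gif + 100⟩,
       ⟨R.cur, R.cur + 8⟩] := id rfl

/-- **`DGifDecompressLine(rdi = gif, rsi = Line, edx = LineLen)`** (dgif_lib.c:860-1003, static; a PROTECTED frame: the `int`
`CrntCode`): decodes `LineLen` pixels into `Line`. Ghost `n` = `LineLen`, not negative; `n = 0`, or `Line` is a buffer of `n` bytes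
(`BufOK`: on the path a part of the last image's raster — a data object of the forest, so the stores keep the shape — that does NOT MEET
THE PRIVATE OBJECT: `BufOK.loose` alone admits the body of pv, and a `Line` inside pv would overwrite the LZW scalars). `Line[i]`
is written only for `i < n`. Post, for BOTH results: `LZOK` again (an error return leaves `pv.StackPtr`, `pv.LastCode` as they
were), the environment. Footprint: `Line[0 … n)`, `[pv + 20, pv + 56)` (RunningCode … CrntShiftDWord), the FOUR TABLES as four
windows, `gif.Error`, `c->cur`. -/
def DGifDecompressLine.spec (H : Heap) (rest : List Obj) (frames : List (Nat × FrameLayout)) (F : Forest) (R : Rd) (n : Nat) :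
    Spec where
  pre u :=
    Env H rest frames F R u ∧
    LZOK u.mem F.pv ∧
    (u.reg .rdi).toNat = F.gif ∧
    (u.reg .rdx).toNat % 2 ^ 32 = n ∧ n < 2 ^ 31 ∧
    (n = 0 ∨
      (BufOK H rest frames F R (u.reg .rsi).toNat n ∧
       ((u.reg .rsi).toNat + n ≤ F.pv ∨ F.pv + 24936 ≤ (u.reg .rsi).toNat)))
  post u v :=
    Back H rest frames F R u v ∧
    LZOK v.mem F.pv ∧
    IsBool v
  frame := 560
  writes u :=
    [⟨(u.reg .rsi).toNat, (u.reg .rsi).toNat + n⟩,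
     ⟨F.pv + 20, F.pv + 56⟩,
     ⟨F.pv + 88, F.pv + 344⟩,
     ⟨F.pv + 344, F.pv + 4439⟩,
     ⟨F.pv + 4439, F.pv + 8535⟩,
     ⟨F.pv + 8536, F.pv + 24920⟩,
     ⟨F.gif + 96, F.gif + 100⟩,
     ⟨R.cur, R.cur + 8⟩]

@[vspec] theorem DGifDecompressLine.spec_frame (H : Heap) (rest : List Obj) (frames : List (Nat × FrameLayout)) (F : Forest)
    (R : Rd) (n : Nat) : (DGifDecompressLine.spec H rest frames F R n).frame = 560 := id rfl

@[vspec] theorem DGifDecompressLine.spec_writes (H : Heap) (rest : List Obj) (frames : List (Nat × FrameLayout)) (F : Forest)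
    (R : Rd) (n : Nat) (u : State) :
    (DGifDecompressLine.spec H rest frames F R n).writes u =
      [⟨(u.reg .rsi).toNat, (u.reg .rsi).toNat + n⟩,
       ⟨F.pv + 20, F.pv + 56⟩,
       ⟨F.pv + 88, F.pv + 344⟩,
       ⟨F.pv + 344, F.pv + 4439⟩,
       ⟨F.pv + 4439, F.pv + 8535⟩,
       ⟨F.pv + 8536, F.pv + 24920⟩,
       ⟨F.gif + 96, F.gif + 100⟩,
       ⟨R.cur, R.cur + 8⟩] := id rfl

/-- **`DGifGetLine(rdi = gif, rsi = Line, edx = LineLen)`** (dgif_lib.c:484-522; a PROTECTED frame: the pointer `Dummy`): the tests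
(`IS_READABLE`; `LineLen < 0`, `PixelCount < LineLen`: plain error returns, walked), `PixelCount −= LineLen`,
DGifDecompressLine, and when `PixelCount` reached 0 the flush loop of DGifGetCodeNext (measure: `rem`). Ghost `n` = `LineLen`,
AT LEAST 1 (both call sites of DGifSlurp: INVARIANTS §4; with 0 the function would use `gif.Image.Width` instead); `Line` is a
buffer of `n` bytes. Post, for both results: `LZOK`, the environment. Footprint: DGifDecompressLine's and `pv.PixelCount`. -/
def DGifGetLine.spec (H : Heap) (rest : List Obj) (frames : List (Nat × FrameLayout)) (F : Forest) (R : Rd) (n : Nat) : Spec where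
  pre u :=
    Env H rest frames F R u ∧
    LZOK u.mem F.pv ∧
    (u.reg .rdi).toNat = F.gif ∧
    (u.reg .rdx).toNat % 2 ^ 32 = n ∧ 1 ≤ n ∧ n < 2 ^ 31 ∧
    BufOK H rest frames F R (u.reg .rsi).toNat n ∧
    ((u.reg .rsi).toNat + n ≤ F.pv ∨ F.pv + 24936 ≤ (u.reg .rsi).toNat)
  post u v :=
    Back H rest frames F R u v ∧
    LZOK v.mem F.pv ∧
    IsBool v
  frame := 688
  writes u :=
    [⟨(u.reg .rsi).toNat, (u.reg .rsi).toNat + n⟩,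
     ⟨F.pv + 20, F.pv + 64⟩,
     ⟨F.pv + 88, F.pv + 344⟩,
     ⟨F.pv + 344, F.pv + 4439⟩,
     ⟨F.pv + 4439, F.pv + 8535⟩,
     ⟨F.pv + 8536, F.pv + 24920⟩,
     ⟨F.gif + 96, F.gif + 100⟩,
     ⟨R.cur, R.cur + 8⟩]

@[vspec] theorem DGifGetLine.spec_frame (H : Heap) (rest : List Obj) (frames : List (Nat × FrameLayout)) (F : Forest) (R : Rd)
    (n : Nat) : (DGifGetLine.spec H rest frames F R n).frame = 688 := id rfl

@[vspec] theorem DGifGetLine.spec_writes (H : Heap) (rest : List Obj) (frames : List (Nat × FrameLayout)) (F : Forest) (R : Rd)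
    (n : Nat) (u : State) :
    (DGifGetLine.spec H rest frames F R n).writes u =
      [⟨(u.reg .rsi).toNat, (u.reg .rsi).toNat + n⟩,
       ⟨F.pv + 20, F.pv + 64⟩,
       ⟨F.pv + 88, F.pv + 344⟩,
       ⟨F.pv + 344, F.pv + 4439⟩,
       ⟨F.pv + 4439, F.pv + 8535⟩,
       ⟨F.pv + 8536, F.pv + 24920⟩,
       ⟨F.gif + 96, F.gif + 100⟩,
       ⟨R.cur, R.cur + 8⟩] := id rfl

end Gif.Spec
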